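-- pv_equiv track=rewrite | github.com/pilixiaohui/testnovel | project/backend/app/services/entity_resolver.py | _filter_cached_mentions
-- ===== SOURCE A (Python) =====
-- def _filter_cached_mentions(
--     text: str, mention_cache: dict[str, str]
-- ) -> dict[str, str]:
--     return {
--         mention: entity_id
--         for mention, entity_id in mention_cache.items()
--         if mention in text
--     }
-- ===== SOURCE B (Python) =====
-- def _filter_cached_mentions(
--     text: str, mention_cache: dict[str, str]
-- ) -> dict[str, str]:
--     # Collect every substring of text whose length occurs among the cached
--     # mentions into a set, then keep cache entries by set membership
--     # (no per-mention substring scan of text).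
--     lengths = {len(mention) for mention in mention_cache}
--     n = len(text)
--     found = set()
--     for length in lengths:
--         for i in range(n - length + 1):
--             found.add(text[i:i + length])
--     result = {}
--     for mention, entity_id in mention_cache.items():
--         if mention in found:
--             result[mention] = entity_id
--     return result
-- ===== Notes on version B (the rewrite author's own statement) =====
-- stated objective: faster
-- what changed: Instead of running a substring search of text for each cached mention, B enumerates every substring of text whose length occurs among the mentions into a hash set (one text scan per distinct mention length), then filters the cache by O(1) set membership.
import Mathlib
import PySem

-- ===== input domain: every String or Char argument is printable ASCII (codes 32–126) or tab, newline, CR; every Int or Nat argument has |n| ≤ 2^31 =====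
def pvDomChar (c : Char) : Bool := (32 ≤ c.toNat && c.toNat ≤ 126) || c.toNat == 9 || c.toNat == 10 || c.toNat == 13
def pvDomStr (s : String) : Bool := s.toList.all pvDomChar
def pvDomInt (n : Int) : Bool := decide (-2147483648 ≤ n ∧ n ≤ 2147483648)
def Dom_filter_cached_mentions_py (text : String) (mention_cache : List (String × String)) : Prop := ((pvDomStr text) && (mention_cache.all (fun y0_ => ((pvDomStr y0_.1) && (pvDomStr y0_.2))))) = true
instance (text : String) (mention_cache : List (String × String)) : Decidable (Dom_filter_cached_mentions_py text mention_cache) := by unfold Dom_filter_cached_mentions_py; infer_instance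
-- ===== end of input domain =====

-- B replaces A's per-mention `mention in text` scan by one pass that collects every
-- substring of text of a cached-mention length into a set, then filters the cache by
-- set membership (objective: alternative algorithm; same return value).

-- ===== PORT A =====
-- dict comprehension over mention_cache.items() keeping mentions with `mention in text`
def filter_cached_mentions_py (text : String) (mention_cache : List (String × String)) : List (String × String) :=
  (mention_cache.foldl
    (fun d p => if PySem.Str.isIn p.1 text then d.insert p.1 p.2 else d)
    (PySem.Dict.empty : PySem.Dict String String)).items

-- ===== PORT B =====
-- `found` of Source B: for each distinct mention length L, add every text[i:i+L] to a set.
-- (Source B iterates the Python set `lengths` in set order; the fold below iterates it in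
-- first-occurrence order — the resulting set has the same members either way, and the
-- output depends only on membership in `found`, so the port is exact.)
def pvFound (text : String) (mention_cache : List (String × String)) : PySem.Set String :=
  (PySem.Set.ofList (mention_cache.map (fun p => PySem.Str.len p.1))).foldl
    (fun acc L =>
      (PySem.List.pyRange 0 (PySem.Str.len text - L + 1)).foldl
        (fun acc i => PySem.Set.add acc (PySem.Str.slice text (some i) (some (i + L)))) acc)
    PySem.Set.empty

def filter_cached_mentions_py_alt (text : String) (mention_cache : List (String × String)) : List (String × String) :=
  let found := pvFound text mention_cache
  (mention_cache.foldl
    (fun d p => if PySem.Set.contains found p.1 then d.insert p.1 p.2 else d)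
    (PySem.Dict.empty : PySem.Dict String String)).items

-- ===== PRECONDITION & SPEC =====
def Spec_filter_cached_mentions_py (text : String) (mention_cache : List (String × String)) (out : List (String × String)) : Prop := out = filter_cached_mentions_py_alt text mention_cache
instance (text : String) (mention_cache : List (String × String)) (out : List (String × String)) : Decidable (Spec_filter_cached_mentions_py text mention_cache out) := by unfold Spec_filter_cached_mentions_py; infer_instance

-- ===== CLAIM (what is proved, stated in full; the proofs are below) =====
def Claim_equal_filter_cached_mentions_py : Prop := ∀ (text : String) (mention_cache : List (String × String)), Dom_filter_cached_mentions_py text mention_cache → Spec_filter_cached_mentions_py text mention_cache (filter_cached_mentions_py text mention_cache)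

-- ===== LEMMAS AND PROOFS =====

-- membership in a fold that only `Set.add`s elements g y, y drawn from l
theorem pv_mem_foldl_add {α β : Type} [BEq α] [LawfulBEq α] (l : List β) (g : β → α)
    (s : PySem.Set α) (x : α) :
    x ∈ l.foldl (fun acc y => PySem.Set.add acc (g y)) s ↔ x ∈ s ∨ ∃ y ∈ l, g y = x := by
  induction l generalizing s with
  | nil => simp
  | cons h t ih =>
    simp only [List.foldl_cons, ih, PySem.Set.mem_add]
    constructor
    · rintro (⟨hs | he⟩ | ⟨y, hy, hg⟩)
      · exact Or.inl hs
      · exact Or.inr ⟨h, List.mem_cons_self, he.symm⟩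
      · exact Or.inr ⟨y, List.mem_cons_of_mem _ hy, hg⟩
    · rintro (hs | ⟨y, hy, hg⟩)
      · exact Or.inl (Or.inl hs)
      · rcases List.mem_cons.mp hy with rfl | hy
        · exact Or.inl (Or.inr hg.symm)
        · exact Or.inr ⟨y, hy, hg⟩

-- membership in the nested fold (outer over l, inner over R L)
theorem pv_mem_foldl_foldl_add {α : Type} [BEq α] [LawfulBEq α] (l : List Int)
    (R : Int → List Int) (g : Int → Int → α) (s : PySem.Set α) (x : α) :
    x ∈ l.foldl (fun acc L => (R L).foldl (fun acc i => PySem.Set.add acc (g L i)) acc) s ↔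
      x ∈ s ∨ ∃ L ∈ l, ∃ i ∈ R L, g L i = x := by
  induction l generalizing s with
  | nil => simp
  | cons h t ih =>
    simp only [List.foldl_cons, ih, pv_mem_foldl_add]
    constructor
    · rintro (⟨hs | ⟨i, hi, hg⟩⟩ | ⟨L, hL, hrest⟩)
      · exact Or.inl hs
      · exact Or.inr ⟨h, List.mem_cons_self, i, hi, hg⟩
      · exact Or.inr ⟨L, List.mem_cons_of_mem _ hL, hrest⟩
    · rintro (hs | ⟨L, hL, hrest⟩)
      · exact Or.inl (Or.inl hs)
      · rcases List.mem_cons.mp hL with rfl | hL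
        · exact Or.inl (Or.inr hrest)
        · exact Or.inr ⟨L, hL, hrest⟩

-- the heart: for a mention that is a key of the cache, set membership in pvFound
-- coincides with Python's substring test `mention in text`
theorem pv_contains_found_eq (text : String) (mention_cache : List (String × String))
    (p : String × String) (hp : p ∈ mention_cache) :
    PySem.Set.contains (pvFound text mention_cache) p.1 = PySem.Str.isIn p.1 text := by
  rw [Bool.eq_iff_iff, PySem.Set.contains_iff, PySem.Str.isIn_iff_infix]
  unfold pvFound
  rw [pv_mem_foldl_foldl_add]
  constructor
  · rintro (hs | ⟨L, hL, i, hi, hg⟩)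
    · simp [PySem.Set.empty] at hs
    · -- a slice of text is an infix of text
      rw [PySem.Set.mem_ofList] at hL
      obtain ⟨q, _, rfl⟩ := List.mem_map.mp hL
      rw [PySem.List.mem_pyRange_one] at hi
      obtain ⟨hi0, _⟩ := hi
      have hieq : i = ((i.toNat : Nat) : Int) := (Int.toNat_of_nonneg hi0).symm
      have hLeq : PySem.Str.len q.1 = ((q.1.toList.length : Nat) : Int) := PySem.Str.len_eq q.1
      rw [← String.toList_inj, PySem.Str.toList_slice, PySem.Chars.slice_eq_listSlice,
        hieq, hLeq, PySem.List.slice_natCast_add] at hg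
      rw [← hg]
      exact ((List.take_prefix _ _).isInfix).trans ((List.drop_suffix _ _).isInfix)
  · intro hinf
    right
    -- m.toList is a prefix of some drop of text.toList
    have hIn : PySem.Chars.isIn p.1.toList text.toList = true := by
      rw [PySem.Chars.isIn_iff_infix]; exact hinf
    obtain ⟨j, hpre⟩ := (PySem.Chars.exists_prefix_drop_iff_isIn p.1.toList text.toList).mpr hIn
    -- normalise j into range
    set s := text.toList with hs
    set k := p.1.toList.length with hk
    have hpre' : p.1.toList <+: s.drop (min j s.length) := by
      by_cases hj : j ≤ s.length
      · rwa [min_eq_left hj]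
      · have : s.drop j = [] := List.drop_eq_nil_of_le (by omega)
        rw [this] at hpre
        have : p.1.toList = [] := List.prefix_nil.mp hpre
        simp [this]
    set j' := min j s.length with hj'
    have hj'le : j' ≤ s.length := min_le_right _ _
    have hlen : k ≤ s.length - j' := by
      have := hpre'.length_le
      simpa [← hk, List.length_drop] using this
    refine ⟨PySem.Str.len p.1, ?_, (j' : Int), ?_, ?_⟩
    · rw [PySem.Set.mem_ofList]
      exact List.mem_map.mpr ⟨p, hp, rfl⟩
    · rw [PySem.List.mem_pyRange_one]
      rw [PySem.Str.len_eq text, PySem.Str.len_eq p.1, ← hs, ← hk]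
      constructor
      · omega
      · omega
    · rw [← String.toList_inj, PySem.Str.toList_slice, PySem.Chars.slice_eq_listSlice,
        PySem.Str.len_eq p.1, ← hk, PySem.List.slice_natCast_add]
      exact ((List.prefix_iff_eq_take.mp hpre').symm)

-- ===== VERDICT (by name: the statement is the Claim_ definition above) =====
theorem filter_cached_mentions_py_spec : Claim_equal_filter_cached_mentions_py := by
  intro text mention_cache _
  unfold Spec_filter_cached_mentions_py filter_cached_mentions_py filter_cached_mentions_py_alt
  refine congrArg PySem.Dict.items ?_
  refine PySem.List.foldl_congr_mem _ _ _ _ ?_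
  intro acc x hx
  rw [pv_contains_found_eq text mention_cache x hx]
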